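-- pv_equiv track=rewrite | github.com/Ravi-Wijerathne/yt_downloader | gui/main_window.py | _is_valid_youtube_url
-- ===== SOURCE A (Python) =====
-- def _is_valid_youtube_url(url: str) -> bool:
--     """Check if URL is a valid YouTube URL"""
--     youtube_patterns = [
--         'youtube.com/watch',
--         'youtube.com/shorts',
--         'youtube.com/playlist',
--         'youtu.be/',
--         'youtube.com/embed',
--         'youtube.com/v/'
--     ]
--     url_lower = url.lower()
--     return any(pattern in url_lower for pattern in youtube_patterns)
-- ===== SOURCE B (Python) =====
-- def _is_valid_youtube_url(url: str) -> bool: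
--     """Check if URL is a valid YouTube URL (single left-to-right scan).
--
--     All six accepted patterns share the prefix 'youtu', so instead of six
--     independent substring searches we scan the lowered URL once: at every
--     occurrence of 'youtu' we test which of the pattern tails follows.
--     """
--     tails = ('be.com/watch', 'be.com/shorts', 'be.com/playlist',
--              '.be/', 'be.com/embed', 'be.com/v/')
--     s = url.lower()
--     for i in range(len(s)):
--         if s.startswith('youtu', i) and any(s.startswith(t, i + 5) for t in tails):
--             return True
--     return False
-- ===== Notes on version B (the rewrite author's own statement) =====
-- stated objective: alternative
-- what changed: Instead of six independent substring searches combined with any(), B lowers the URL once and makes a single left-to-right scan that tests the five-character prefix shared by all six patterns at each position and, only on a match, checks which of the six pattern tails follows.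
import Mathlib
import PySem

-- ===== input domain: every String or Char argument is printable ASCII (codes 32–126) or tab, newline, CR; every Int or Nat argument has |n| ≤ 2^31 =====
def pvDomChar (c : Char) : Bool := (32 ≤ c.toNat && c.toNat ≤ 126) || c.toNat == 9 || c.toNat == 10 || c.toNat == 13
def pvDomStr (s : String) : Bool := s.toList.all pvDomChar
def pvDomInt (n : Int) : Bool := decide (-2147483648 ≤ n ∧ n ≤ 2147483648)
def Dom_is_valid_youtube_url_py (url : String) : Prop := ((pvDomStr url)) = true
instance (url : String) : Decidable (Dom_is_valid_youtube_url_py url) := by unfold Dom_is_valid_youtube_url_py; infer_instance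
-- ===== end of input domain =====

-- B replaces six independent substring searches by a single left-to-right scan that
-- tests the patterns' shared five-character prefix once per position (objective: alternative decomposition).


-- ===== PORT A =====
def pvYtPatterns : List String :=
  ["youtube.com/watch", "youtube.com/shorts", "youtube.com/playlist",
   "youtu.be/", "youtube.com/embed", "youtube.com/v/"]

def is_valid_youtube_url_py (url : String) : Bool :=
  let url_lower := PySem.Str.lower url
  pvYtPatterns.any (fun pattern => PySem.Str.isIn pattern url_lower)

-- ===== PORT B =====
-- the pattern tails following the shared prefix 'youtu'
def pvYtTails : List String :=
  ["be.com/watch", "be.com/shorts", "be.com/playlist", ".be/", "be.com/embed", "be.com/v/"]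

-- the body of Source B's loop at one position: s.startswith('youtu', i) and any(s.startswith(t, i+5) …),
-- expressed on the suffix s[i:] (s.startswith(p, i) is exactly Chars.startswith (s[i:]) p)
def pvYtHit (l : List Char) : Bool :=
  PySem.Chars.startswith l "youtu".toList &&
    pvYtTails.any (fun t => PySem.Chars.startswith (l.drop 5) t.toList)

-- Source B's 'for i in range(len(s))' loop, as structural recursion over the suffixes of s
def pvScanYt : List Char → Bool
  | [] => false
  | c :: rest => pvYtHit (c :: rest) || pvScanYt rest

def is_valid_youtube_url_py_alt (url : String) : Bool :=
  pvScanYt (PySem.Str.lower url).toList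

-- ===== PRECONDITION & SPEC =====
def Spec_is_valid_youtube_url_py (url : String) (out : Bool) : Prop := out = is_valid_youtube_url_py_alt url
instance (url : String) (out : Bool) : Decidable (Spec_is_valid_youtube_url_py url out) := by unfold Spec_is_valid_youtube_url_py; infer_instance

-- ===== CLAIM (what is proved, stated in full; the proofs are below) =====
def Claim_equal_is_valid_youtube_url_py : Prop := ∀ (url : String), Dom_is_valid_youtube_url_py url → Spec_is_valid_youtube_url_py url (is_valid_youtube_url_py url)

-- ===== LEMMAS AND PROOFS =====

-- decomposing a prefix test of a concatenation
lemma pv_append_prefix_iff (a b t : List Char) :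
    (a ++ b) <+: t ↔ a <+: t ∧ b <+: t.drop a.length := by
  induction a generalizing t with
  | nil => simp
  | cons c a ih =>
    cases t with
    | nil => simp
    | cons d t => simp [List.cons_prefix_cons, ih, and_assoc]

-- the scan succeeds iff some suffix is a hit
lemma pv_scan_iff (l : List Char) :
    pvScanYt l = true ↔ ∃ t, t <:+ l ∧ pvYtHit t = true := by
  induction l with
  | nil =>
    simp only [pvScanYt, Bool.false_eq_true, false_iff]
    rintro ⟨t, ht, hh⟩
    rw [List.suffix_nil] at ht
    subst ht
    simp only [pvYtHit, Bool.and_eq_true, PySem.Chars.startswith_iff] at hh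
    have h0 : ("youtu" : String) = "" := String.toList_eq_nil_iff.mp (List.prefix_nil.mp hh.1)
    exact absurd h0 (by decide)
  | cons c rest ih =>
    simp [pvScanYt, Bool.or_eq_true, ih, List.suffix_cons_iff, or_and_right, exists_or]

-- a suffix is a hit iff one of A's six patterns is a prefix of it
lemma pv_hit_iff (t : List Char) :
    pvYtHit t = true ↔ ∃ p ∈ pvYtPatterns, p.toList <+: t := by
  have e1 : ("youtube.com/watch" : String) = "youtu" ++ "be.com/watch" := rfl
  have e2 : ("youtube.com/shorts" : String) = "youtu" ++ "be.com/shorts" := rfl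
  have e3 : ("youtube.com/playlist" : String) = "youtu" ++ "be.com/playlist" := rfl
  have e4 : ("youtu.be/" : String) = "youtu" ++ ".be/" := rfl
  have e5 : ("youtube.com/embed" : String) = "youtu" ++ "be.com/embed" := rfl
  have e6 : ("youtube.com/v/" : String) = "youtu" ++ "be.com/v/" := rfl
  have hlen : ("youtu".toList : List Char).length = 5 := by simp
  simp only [pvYtHit, pvYtTails, pvYtPatterns, Bool.and_eq_true, List.any_eq_true,
    List.mem_cons, List.not_mem_nil, or_false, exists_eq_or_imp, exists_eq_left,
    PySem.Chars.startswith_iff, e1, e2, e3, e4, e5, e6, String.toList_append,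
    pv_append_prefix_iff, hlen, and_or_left]

-- A succeeds iff some suffix of the lowered URL is a hit
lemma pv_A_iff (url : String) :
    is_valid_youtube_url_py url = true ↔
      ∃ t, t <:+ (PySem.Str.lower url).toList ∧ pvYtHit t = true := by
  simp only [is_valid_youtube_url_py, List.any_eq_true, PySem.Str.isIn_iff_infix,
    List.infix_iff_prefix_suffix, pv_hit_iff]
  constructor
  · rintro ⟨p, hp, t, hpre, hsuf⟩
    exact ⟨t, hsuf, p, hp, hpre⟩
  · rintro ⟨t, hsuf, p, hp, hpre⟩
    exact ⟨p, hp, t, hpre, hsuf⟩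

-- ===== VERDICT (by name: the statement is the Claim_ definition above) =====
theorem is_valid_youtube_url_py_spec : Claim_equal_is_valid_youtube_url_py := by
  intro url _
  unfold Spec_is_valid_youtube_url_py
  rw [Bool.eq_iff_iff, pv_A_iff, is_valid_youtube_url_py_alt, pv_scan_iff]
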